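-- pv_equiv track=rewrite | github.com/team2or/stcode | ljk/20220119.py | solution
-- ===== SOURCE A (Python) =====
-- def solution(s):
--     upper=[]
--     low=[]
--     for i in s:
--         if i.isupper():
--             upper.append(i)
--         else:
--             low.append(i)
--     low.sort()
--     low.reverse()
--     upper.sort()
--     upper.reverse()
--     return ''.join(low)+''.join(upper)
-- ===== SOURCE B (Python) =====
-- def solution(s):
--     counts = {}
--     for ch in s:
--         counts[ch] = counts.get(ch, 0) + 1
--     low = []
--     up = []
--     for c in range(127, -1, -1):
--         ch = chr(c)
--         block = ch * counts.get(ch, 0)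
--         if 'A' <= ch <= 'Z':
--             up.append(block)
--         else:
--             low.append(block)
--     return ''.join(low) + ''.join(up)
-- ===== Notes on version B (the rewrite author's own statement) =====
-- stated objective: faster
-- what changed: Replaces partition-then-two-comparison-sorts (sort+reverse each) by a single counting pass over the string plus one descending sweep of the fixed 128-slot ASCII alphabet emitting each character's block (counting sort).
import Mathlib
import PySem

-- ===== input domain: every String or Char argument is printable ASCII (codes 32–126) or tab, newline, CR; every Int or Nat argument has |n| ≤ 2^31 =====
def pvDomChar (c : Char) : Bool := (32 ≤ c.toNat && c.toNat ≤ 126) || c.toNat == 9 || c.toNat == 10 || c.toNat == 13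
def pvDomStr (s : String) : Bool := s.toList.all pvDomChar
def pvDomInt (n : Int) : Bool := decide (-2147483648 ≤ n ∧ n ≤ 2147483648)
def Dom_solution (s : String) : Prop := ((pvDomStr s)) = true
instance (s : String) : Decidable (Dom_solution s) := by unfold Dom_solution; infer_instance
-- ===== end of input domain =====

-- B replaces A's partition + two comparison sorts by a single counting pass and a
-- descending sweep over the fixed 128-slot ASCII alphabet (counting sort): O(n + 128) vs O(n log n).

-- ===== PORT A =====
-- A: partition chars into upper/low lists, sort each ascending, reverse, join low then upper.
def solution (s : String) : String :=
  let st := s.toList.foldl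
    (fun (acc : List Char × List Char) i =>
      if PySem.Chars.isupper i then (acc.1 ++ [i], acc.2) else (acc.1, acc.2 ++ [i]))
    ([], [])
  let low := (PySem.List.sorted st.2 (fun x => x)).reverse
  let upper := (PySem.List.sorted st.1 (fun x => x)).reverse
  String.mk low ++ String.mk upper

-- ===== PORT B =====
-- B: count occurrences in a dict, then walk codes 127..0 emitting each char's block
-- into the low or upper run; exact on Dom (ASCII input).
def solution_alt (s : String) : String :=
  let counts := s.toList.foldl
    (fun (d : PySem.Dict Char Int) ch => d.insert ch (d.getD ch 0 + 1)) PySem.Dict.empty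
  let st := (PySem.List.pyRange 127 (-1) (-1)).foldl
    (fun (acc : List Char × List Char) c =>
      let ch := Char.ofNat c.toNat
      let block := List.replicate (counts.getD ch 0).toNat ch
      if 'A' ≤ ch ∧ ch ≤ 'Z' then (acc.1, acc.2 ++ block) else (acc.1 ++ block, acc.2))
    ([], [])
  String.mk st.1 ++ String.mk st.2

-- ===== PRECONDITION & SPEC =====
def Spec_solution (s : String) (out : String) : Prop := out = solution_alt s
instance (s : String) (out : String) : Decidable (Spec_solution s out) := by unfold Spec_solution; infer_instance

-- ===== CLAIM (what is proved, stated in full; the proofs are below) =====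
def Claim_equal_solution : Prop := ∀ (s : String), Dom_solution s → Spec_solution s (solution s)

-- ===== LEMMAS AND PROOFS =====

lemma toNat_ofNat_lt128 : ∀ n, n < 128 → (Char.ofNat n).toNat = n := by decide

set_option maxRecDepth 100000 in
lemma ofNat_le_ofNat : ∀ a, a < 128 → ∀ b, b < 128 → a ≤ b → Char.ofNat a ≤ Char.ofNat b := by
  decide

set_option maxRecDepth 100000 in
lemma csall_gt : (PySem.List.pyRange 127 (-1) (-1)).Pairwise (fun a b : Int => b < a) := by
  decide

set_option maxRecDepth 20000 in
lemma csall_bound : ∀ c ∈ PySem.List.pyRange 127 (-1) (-1), 0 ≤ c ∧ c < 128 := by decide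

set_option maxRecDepth 20000 in
lemma csall_mem : ∀ n : Nat, n < 128 → ((n : Int)) ∈ PySem.List.pyRange 127 (-1) (-1) := by
  decide

-- A's accumulation loop is the pair of filters.
lemma foldA (l : List Char) (a b : List Char) :
    l.foldl
      (fun (acc : List Char × List Char) i =>
        if PySem.Chars.isupper i then (acc.1 ++ [i], acc.2) else (acc.1, acc.2 ++ [i]))
      (a, b)
    = (a ++ l.filter PySem.Chars.isupper, b ++ l.filter (fun i => !PySem.Chars.isupper i)) := by
  induction l generalizing a b with
  | nil => simp
  | cons x l ih =>
    by_cases h : PySem.Chars.isupper x = true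
    · simp [h, ih]
    · simp [h, ih, List.append_assoc]

-- B's emission loop is a pair of flatMaps over the filtered code list.
lemma foldB (counts : PySem.Dict Char Int) (cs : List Int) (a b : List Char) :
    cs.foldl
      (fun (acc : List Char × List Char) c =>
        if 'A' ≤ Char.ofNat c.toNat ∧ Char.ofNat c.toNat ≤ 'Z' then
          (acc.1, acc.2 ++ List.replicate ((counts.getD (Char.ofNat c.toNat) 0).toNat) (Char.ofNat c.toNat))
        else
          (acc.1 ++ List.replicate ((counts.getD (Char.ofNat c.toNat) 0).toNat) (Char.ofNat c.toNat), acc.2))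
      (a, b)
    = (a ++ (cs.filter (fun c => !PySem.Chars.isupper (Char.ofNat c.toNat))).flatMap
          (fun c => List.replicate (counts.getD (Char.ofNat c.toNat) 0).toNat (Char.ofNat c.toNat)),
       b ++ (cs.filter (fun c => PySem.Chars.isupper (Char.ofNat c.toNat))).flatMap
          (fun c => List.replicate (counts.getD (Char.ofNat c.toNat) 0).toNat (Char.ofNat c.toNat))) := by
  induction cs generalizing a b with
  | nil => simp
  | cons c cs ih =>
    have hiff : PySem.Chars.isupper (Char.ofNat c.toNat) = true ↔
        ('A' ≤ Char.ofNat c.toNat ∧ Char.ofNat c.toNat ≤ 'Z') := by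
      simp [PySem.Chars.isupper]
    by_cases h : 'A' ≤ Char.ofNat c.toNat ∧ Char.ofNat c.toNat ≤ 'Z'
    · have hup : PySem.Chars.isupper (Char.ofNat c.toNat) = true := hiff.mpr h
      simp [h, hup, ih, List.append_assoc]
    · have hup : PySem.Chars.isupper (Char.ofNat c.toNat) = false := by
        rw [Bool.eq_false_iff]
        exact fun ht => h (hiff.mp ht)
      simp [h, hup, ih, List.append_assoc]

-- count of an element in the emitted blocks
lemma count_emit (cs : List Int) (f : Int → Nat) (x : Char)
    (hnd : cs.Nodup) (hlt : ∀ c ∈ cs, 0 ≤ c ∧ c < 128) :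
    (cs.flatMap (fun c => List.replicate (f c) (Char.ofNat c.toNat))).count x
    = if ((x.toNat : Int) ∈ cs) then f (x.toNat : Int) else 0 := by
  induction cs with
  | nil => simp
  | cons c cs ih =>
    have hc := hlt c (List.mem_cons_self)
    have h128 : c.toNat < 128 := by omega
    rcases List.nodup_cons.mp hnd with ⟨hcn, hnd'⟩
    have hkey : (Char.ofNat c.toNat = x) ↔ (c = (x.toNat : Int)) := by
      constructor
      · intro h
        have h2 := congrArg Char.toNat h
        rw [toNat_ofNat_lt128 _ h128] at h2
        omega
      · intro h
        rw [h]
        simp [Char.ofNat_toNat]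
    have ihd := ih hnd' (fun d hd => hlt d (List.mem_cons_of_mem _ hd))
    by_cases hx : c = (x.toNat : Int)
    · have hxm : ((x.toNat : Int) ∉ cs) := hx ▸ hcn
      simp [List.count_append, ihd, hx, hxm]
    · have hne : ¬ (Char.ofNat c.toNat = x) := fun h => hx (hkey.mp h)
      have hx' : ¬ ((x.toNat : Int) = c) := fun h => hx h.symm
      simp [List.count_append, List.count_replicate, ihd, hne, hx']

-- the emitted blocks are descending
lemma pairwise_emit (cs : List Int) (f : Int → Nat)
    (hgt : cs.Pairwise (fun a b : Int => b < a)) (hlt : ∀ c ∈ cs, 0 ≤ c ∧ c < 128) :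
    (cs.flatMap (fun c => List.replicate (f c) (Char.ofNat c.toNat))).Pairwise
      (fun a b => b ≤ a) := by
  induction cs with
  | nil => simp
  | cons c cs ih =>
    rcases List.pairwise_cons.mp hgt with ⟨hhead, htail⟩
    have hc := hlt c (List.mem_cons_self)
    simp only [List.flatMap_cons]
    rw [List.pairwise_append]
    refine ⟨?_, ih htail (fun d hd => hlt d (List.mem_cons_of_mem _ hd)), ?_⟩
    · exact List.pairwise_replicate.mpr (Or.inr le_rfl)
    · intro a ha b hb
      obtain rfl := List.eq_of_mem_replicate ha
      rcases List.mem_flatMap.mp hb with ⟨c', hc', hb'⟩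
      obtain rfl := List.eq_of_mem_replicate hb'
      have hc'b := hlt c' (List.mem_cons_of_mem _ hc')
      exact ofNat_le_ofNat c'.toNat (by omega) c.toNat (by omega)
        (by have := hhead c' hc'; omega)

-- the sorted filtered list is the reverse of the emitted blocks
lemma sorted_eq_emit (m : List Char) (cs : List Int) (f : Int → Nat)
    (hgt : cs.Pairwise (fun a b : Int => b < a))
    (hlt : ∀ c ∈ cs, 0 ≤ c ∧ c < 128)
    (hmem : ∀ x ∈ m, ((x.toNat : Int) ∈ cs))
    (hf : ∀ c ∈ cs, f c = m.count (Char.ofNat c.toNat)) :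
    PySem.List.sorted m (fun x => x)
      = (cs.flatMap (fun c => List.replicate (f c) (Char.ofNat c.toNat))).reverse := by
  have hnd : cs.Nodup := hgt.imp (fun h => by omega)
  apply PySem.List.sorted_id_eq_of_perm_of_pairwise
  · rw [List.perm_iff_count]
    intro x
    rw [List.count_reverse, count_emit cs f x hnd hlt]
    by_cases hx : ((x.toNat : Int) ∈ cs)
    · rw [if_pos hx, hf _ hx]
      congr 1
      simp [Char.ofNat_toNat]
    · rw [if_neg hx]
      symm
      rw [List.count_eq_zero]
      exact fun hm => hx (hmem x hm)
  · rw [List.pairwise_reverse]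
    exact pairwise_emit cs f hgt hlt

lemma main_list (l : List Char) (hl : ∀ x ∈ l, x.toNat < 128) (q : Char → Bool) :
    (PySem.List.sorted (l.filter q) (fun x => x)).reverse
    = ((PySem.List.pyRange 127 (-1) (-1)).filter (fun c => q (Char.ofNat c.toNat))).flatMap
        (fun c => List.replicate (l.count (Char.ofNat c.toNat)) (Char.ofNat c.toNat)) := by
  rw [sorted_eq_emit (l.filter q)
      ((PySem.List.pyRange 127 (-1) (-1)).filter (fun c => q (Char.ofNat c.toNat)))
      (fun c => l.count (Char.ofNat c.toNat))
      (csall_gt.filter _)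
      (fun c hc => csall_bound c (List.mem_of_mem_filter hc))
      ?_ ?_]
  · rw [List.reverse_reverse]
  · intro x hx
    rcases List.mem_filter.mp hx with ⟨hxl, hq⟩
    rw [List.mem_filter]
    refine ⟨csall_mem x.toNat (hl x hxl), ?_⟩
    simpa [Char.ofNat_toNat] using hq
  · intro c hc
    rcases List.mem_filter.mp hc with ⟨_, hq⟩
    rw [List.count_filter hq]

-- ===== VERDICT (by name: the statement is the Claim_ definition above) =====
theorem solution_spec : Claim_equal_solution := by
  intro s hdom
  have hl : ∀ x ∈ s.toList, x.toNat < 128 := by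
    intro x hx
    have h := (List.all_eq_true.mp hdom) x hx
    simp only [pvDomChar, Bool.or_eq_true, Bool.and_eq_true, decide_eq_true_eq,
      beq_iff_eq] at h
    omega
  show solution s = solution_alt s
  have hc : ∀ ch : Char,
      ((s.toList.foldl (fun (d : PySem.Dict Char Int) ch => d.insert ch (d.getD ch 0 + 1))
        PySem.Dict.empty).getD ch 0).toNat = s.toList.count ch := by
    intro ch
    rw [PySem.Dict.getD_foldl_insert_add_one]
    simp
  simp only [solution, solution_alt, foldA, foldB, List.nil_append]
  simp only [hc]
  rw [main_list s.toList hl (fun i => !PySem.Chars.isupper i),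
      main_list s.toList hl PySem.Chars.isupper]
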